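-- pv_equiv track=rewrite | github.com/WSm-77/algorithms_and_data_structures | progress_tests/2022-23/complementary/kolu.py | ice_cream
-- ===== SOURCE A (Python) =====
-- def counting_sort(array: list, n):
--     arrayLen = len(array)
--     cnt = [0]*n
--
--     for ele in array:
--         cnt[ele] += 1
--
--     for i in range(1, n):
--         cnt[i] += cnt[i - 1]
--
--     sortedArray = [0]*arrayLen
--
--     for i in range(arrayLen - 1, -1, -1):
--         cnt[array[i]] -= 1
--         idx = cnt[array[i]]
--         sortedArray[idx] = array[i]
--
--     return sortedArray
--
-- def ice_cream( T ):
--     # tu prosze wpisac wlasna implementacje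
--     n = len(T)
--     iceCreamAmount = 0
--     time = 0
--     remainingTab = []
--
--     for amount in T:
--         if amount >= n:
--             iceCreamAmount += amount
--             time += 1
--         else:
--             remainingTab.append(amount)
--
--     remainingTab = counting_sort(remainingTab, n)
--
--     for i in range(len(remainingTab) - 1, -1, -1):
--         # all left ice creams have already melt
--         if remainingTab[i] <= time:
--             break
--         iceCreamAmount += remainingTab[i]
--         time += 1
--
--     return iceCreamAmount - (time*(time - 1) // 2)
-- ===== SOURCE B (Python) =====
-- def ice_cream(T):
--     total = 0
--     for i, a in enumerate(sorted(T, reverse=True)):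
--         if a <= i:
--             break
--         total += a - i
--     return total
-- ===== Notes on version B (the rewrite author's own statement) =====
-- stated objective: simpler
-- what changed: B replaces A's partition into big/small amounts, hand-written counting sort, explicit time counter and post-loop triangular-number subtraction by one descending sort of the whole input and a single fold that adds the net gain a-i for each prefix element with a>i.
-- outside the precondition, e.g. on ice_cream([-1, 1, 1]): A returns 0, B returns 1; on ice_cream([-5]): A raises IndexError, B returns 0
import Mathlib
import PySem

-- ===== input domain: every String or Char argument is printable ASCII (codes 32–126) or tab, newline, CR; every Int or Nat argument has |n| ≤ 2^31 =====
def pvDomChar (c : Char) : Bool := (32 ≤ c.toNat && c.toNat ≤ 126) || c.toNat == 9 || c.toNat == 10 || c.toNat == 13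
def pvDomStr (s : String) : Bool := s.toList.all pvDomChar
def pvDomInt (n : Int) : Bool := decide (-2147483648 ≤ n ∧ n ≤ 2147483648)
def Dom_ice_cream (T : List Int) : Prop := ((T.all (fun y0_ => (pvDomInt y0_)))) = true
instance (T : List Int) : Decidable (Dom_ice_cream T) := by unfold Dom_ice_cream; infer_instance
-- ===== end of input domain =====

-- B sorts the whole input descending once and folds the net gain a-i over the prefix with a>i,
-- replacing A's partition + counting sort + time counter + final triangular subtraction (objective: simpler).

-- ===== PORT A =====
def counting_sort (array : List Int) (n : Int) : List Int :=
  let arrayLen := PySem.List.len array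
  let cnt0 : List Int := PySem.List.pyRepeat [0] n
  let cnt1 := array.foldl
    (fun c ele => PySem.List.pySetD c ele (PySem.List.pyGetD c ele 0 + 1)) cnt0
  let cnt2 := (PySem.List.pyRange 1 n 1).foldl
    (fun c i => PySem.List.pySetD c i (PySem.List.pyGetD c i 0 + PySem.List.pyGetD c (i - 1) 0)) cnt1
  let sorted0 : List Int := PySem.List.pyRepeat [0] arrayLen
  let st := (PySem.List.pyRange (arrayLen - 1) (-1) (-1)).foldl
    (fun (st : List Int × List Int) i =>
      let c := PySem.List.pySetD st.1 (PySem.List.pyGetD array i 0)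
                 (PySem.List.pyGetD st.1 (PySem.List.pyGetD array i 0) 0 - 1)
      let idx := PySem.List.pyGetD c (PySem.List.pyGetD array i 0) 0
      (c, PySem.List.pySetD st.2 idx (PySem.List.pyGetD array i 0))) (cnt2, sorted0)
  st.2

-- the second loop of ice_cream, with its 'break' as early return
def iceLoop (remainingTab : List Int) : List Int → Int × Int → Int × Int
  | [], st => st
  | i :: rest, st =>
    if PySem.List.pyGetD remainingTab i 0 ≤ st.2 then st
    else iceLoop remainingTab rest (st.1 + PySem.List.pyGetD remainingTab i 0, st.2 + 1)

def ice_cream (T : List Int) : Int :=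
  let n := PySem.List.len T
  let st := T.foldl
    (fun (st : Int × Int × List Int) amount =>
      if amount ≥ n then (st.1 + amount, st.2.1 + 1, st.2.2)
      else (st.1, st.2.1, st.2.2 ++ [amount])) (0, 0, ([] : List Int))
  let remainingTab := counting_sort st.2.2 n
  let st2 := iceLoop remainingTab
    (PySem.List.pyRange (PySem.List.len remainingTab - 1) (-1) (-1)) (st.1, st.2.1)
  st2.1 - PySem.Int.floordiv (st2.2 * (st2.2 - 1)) 2

-- ===== PORT B =====
-- the enumerate loop of Source B: i is the index, total the accumulator; 'break' as early return
def altLoop : List Int → Int → Int → Int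
  | [], _, total => total
  | a :: rest, i, total => if a ≤ i then total else altLoop rest (i + 1) (total + (a - i))

def ice_cream_alt (T : List Int) : Int :=
  altLoop (PySem.List.sorted T (fun x => x) true) 0 0

-- ===== PRECONDITION & SPEC =====
-- Pre_ excludes lists containing a negative amount: outside the natural domain of the task,
-- A's counting sort either raises IndexError (element < -len) or returns an accidental value
-- via Python negative-index wraparound in its count array.
def Pre_ice_cream (T : List Int) : Prop := ∀ x ∈ T, 0 ≤ x
instance (T : List Int) : Decidable (Pre_ice_cream T) := by unfold Pre_ice_cream; infer_instance
def pvWitness_ice_cream : List Int := [3, 1, 0, 2, 2]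

def Spec_ice_cream (T : List Int) (out : Int) : Prop := out = ice_cream_alt T
instance (T : List Int) (out : Int) : Decidable (Spec_ice_cream T out) := by unfold Spec_ice_cream; infer_instance

-- ===== CLAIM (what is proved, stated in full; the proofs are below) =====
def Claim_equal_ice_cream : Prop := ∀ (T : List Int), Dom_ice_cream T → Pre_ice_cream T → Spec_ice_cream T (ice_cream T)

-- ===== LEMMAS AND PROOFS =====

-- proof-side abbreviations
def cLT (l : List Int) (v : Int) : Nat := l.countP (fun y => decide (y < v))
def cLE (l : List Int) (v : Int) : Nat := l.countP (fun y => decide (y ≤ v))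
def Sasc (l : List Int) : List Int := PySem.List.sorted l (fun x => x) false

-- counting arithmetic
lemma count_split (l : List Int) (v : Int) : cLE l v = cLT l v + l.count v := by
  induction l with
  | nil => simp [cLT, cLE]
  | cons x xs ih =>
    rcases lt_trichotomy x v with h | h | h
    · simp [cLT, cLE, h, le_of_lt h, ne_of_lt h] at *
      omega
    · subst h
      simp [cLT, cLE] at *
      omega
    · simp [cLT, cLE, not_lt.mpr (le_of_lt h), not_le.mpr h, (ne_of_gt h)] at *
      omega

lemma cLT_succ (l : List Int) (v : Int) : cLT l (v + 1) = cLE l v := by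
  unfold cLT cLE
  apply List.countP_congr
  intro x _
  simp

lemma cLT_zero (l : List Int) (h : ∀ x ∈ l, 0 ≤ x) : cLT l 0 = 0 := by
  unfold cLT
  rw [List.countP_eq_zero]
  intro x hx
  simpa using not_lt.mpr (h x hx)

lemma countP_le_of_drop_none (S : List Int) (q : Int → Bool) (p : Nat)
    (h0 : ∀ x ∈ S.drop p, q x = false) : S.countP q ≤ p := by
  have h1 : S.countP q = (S.take p).countP q + (S.drop p).countP q := by
    conv_lhs => rw [← List.take_append_drop p S]
    rw [List.countP_append]
  have h2 : (S.drop p).countP q = 0 := List.countP_eq_zero.mpr (by simpa using h0)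
  have h3 : (S.take p).countP q ≤ (S.take p).length := List.countP_le_length
  have h4 : (S.take p).length ≤ p := by simp
  omega

lemma le_countP_of_take_all (S : List Int) (q : Int → Bool) (p : Nat) (hp : p ≤ S.length)
    (h : ∀ x ∈ S.take p, q x = true) : p ≤ S.countP q := by
  have h1 : (S.take p).countP q = (S.take p).length := List.countP_eq_length.mpr h
  have h2 : (S.take p).countP q ≤ S.countP q := (List.take_sublist p S).countP_le
  have h3 : (S.take p).length = p := by simp [hp]
  omega

-- sorted-list characterisation
lemma sorted_getElem_mono (S : List Int) (hpw : S.Pairwise (· ≤ ·)) {i j : Nat}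
    (hij : i ≤ j) (hj : j < S.length) : S[i]'(by omega) ≤ S[j] := by
  rcases Nat.eq_or_lt_of_le hij with rfl | h
  · exact le_refl _
  · exact (List.pairwise_iff_getElem.mp hpw) i j (by omega) hj h

lemma SL1a (S : List Int) (hpw : S.Pairwise (· ≤ ·)) (p : Nat) (hp : p < S.length) :
    cLT S (S[p]) ≤ p := by
  apply countP_le_of_drop_none
  intro x hx
  obtain ⟨j, hj, rfl⟩ := List.mem_iff_getElem.mp hx
  have hpj : p + j < S.length := by simp at hj; omega
  rw [List.getElem_drop]
  simp only [decide_eq_false_iff_not, not_lt]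
  exact sorted_getElem_mono S hpw (Nat.le_add_right p j) hpj

lemma SL1b (S : List Int) (hpw : S.Pairwise (· ≤ ·)) (p : Nat) (hp : p < S.length) :
    p + 1 ≤ cLE S (S[p]) := by
  apply le_countP_of_take_all _ _ _ (by omega)
  intro x hx
  obtain ⟨j, hj, rfl⟩ := List.mem_iff_getElem.mp hx
  rw [List.getElem_take]
  simp only [decide_eq_true_eq]
  exact sorted_getElem_mono S hpw (by simp at hj; omega) hp

lemma SL2 (S : List Int) (hpw : S.Pairwise (· ≤ ·)) (v : Int) (p : Nat) (hp : p < S.length)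
    (h1 : cLT S v ≤ p) (h2 : p < cLT S v + S.count v) : S[p] = v := by
  by_contra hne
  rcases lt_or_gt_of_ne hne with hlt | hgt
  · have : p + 1 ≤ cLT S v := by
      apply le_countP_of_take_all _ _ _ (by omega)
      intro x hx
      obtain ⟨j, hj, rfl⟩ := List.mem_iff_getElem.mp hx
      rw [List.getElem_take]
      simp only [decide_eq_true_eq]
      exact lt_of_le_of_lt (sorted_getElem_mono S hpw (by simp at hj; omega) hp) hlt
    omega
  · have hle : cLE S v ≤ p := by
      apply countP_le_of_drop_none
      intro x hx
      obtain ⟨j, hj, rfl⟩ := List.mem_iff_getElem.mp hx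
      have hpj : p + j < S.length := by simp at hj; omega
      rw [List.getElem_drop]
      simp only [decide_eq_false_iff_not, not_le]
      exact lt_of_lt_of_le hgt (sorted_getElem_mono S hpw (Nat.le_add_right p j) hpj)
    have := count_split S v
    omega

-- Sasc facts
lemma Sasc_pairwise (l : List Int) : (Sasc l).Pairwise (· ≤ ·) := by
  simpa using PySem.List.sorted_pairwise l (fun x : Int => x)

lemma Sasc_perm (l : List Int) : (Sasc l).Perm l := PySem.List.sorted_perm l _ _

lemma Sasc_length (l : List Int) : (Sasc l).length = l.length := (Sasc_perm l).length_eq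

lemma cLT_Sasc (l : List Int) (v : Int) : cLT (Sasc l) v = cLT l v := (Sasc_perm l).countP_eq _

lemma count_Sasc (l : List Int) (v : Int) : (Sasc l).count v = l.count v := (Sasc_perm l).count_eq _

-- Python index helpers
lemma pyGetD_toNat (c : List Int) (x : Int) (hx0 : 0 ≤ x) (hlt : x < (c.length : Int)) :
    PySem.List.pyGetD c x 0 = c.getD x.toNat 0 := by
  rw [PySem.List.pyGetD_eq_getElem c 0 hx0 hlt]
  exact (List.getD_eq_getElem c 0 (by omega)).symm

lemma getD_set (c : List Int) (j v : Nat) (w : Int) (_ : j < c.length) (hv : v < c.length) :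
    (c.set j w).getD v 0 = if j = v then w else c.getD v 0 := by
  rw [List.getD_eq_getElem _ 0 (by simpa using hv), List.getElem_set]
  by_cases h : j = v
  · simp [h]
  · rw [if_neg h, if_neg h, ← List.getD_eq_getElem c 0 hv]

-- ===== counting_sort, phase 1: counts =====
lemma cnt1_spec (ar : List Int) : ∀ (c : List Int),
    (∀ x ∈ ar, 0 ≤ x ∧ x < (c.length : Int)) →
    (ar.foldl (fun c ele => PySem.List.pySetD c ele (PySem.List.pyGetD c ele 0 + 1)) c).length = c.length ∧
    ∀ v : Nat, v < c.length →
      (ar.foldl (fun c ele => PySem.List.pySetD c ele (PySem.List.pyGetD c ele 0 + 1)) c).getD v 0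
        = c.getD v 0 + (ar.count ((v : Nat) : Int) : Int) := by
  induction ar with
  | nil => intro c _; simp
  | cons x xs ih =>
    intro c h
    obtain ⟨hx0, hxlt⟩ := h x (by simp)
    have hxn : x.toNat < c.length := by omega
    have hstep : PySem.List.pySetD c x (PySem.List.pyGetD c x 0 + 1)
        = c.set x.toNat (c.getD x.toNat 0 + 1) := by
      rw [pyGetD_toNat c x hx0 hxlt, PySem.List.pySetD_of_nonneg c _ hx0]
    have hlen' : (c.set x.toNat (c.getD x.toNat 0 + 1)).length = c.length := by simp
    have hb : ∀ y ∈ xs, 0 ≤ y ∧ y < ((c.set x.toNat (c.getD x.toNat 0 + 1)).length : Int) := by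
      intro y hy; rw [hlen']; exact h y (by simp [hy])
    obtain ⟨ihlen, ihval⟩ := ih _ hb
    constructor
    · rw [List.foldl_cons, hstep]
      exact ihlen.trans hlen'
    · intro v hv
      rw [List.foldl_cons, hstep, ihval v (by omega), getD_set c x.toNat v _ hxn hv]
      by_cases hvx : x.toNat = v
      · have hxv : x = ((v : Nat) : Int) := by omega
        rw [if_pos hvx, hxv, List.count_cons_self]
        push_cast
        simp only [Int.toNat_natCast]
        ring
      · have hxv : x ≠ ((v : Nat) : Int) := by omega
        rw [if_neg hvx, List.count_cons_of_ne hxv]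

-- ===== counting_sort, phase 2: prefix sums =====
lemma cnt2_spec (c : List Int) (n : Int) (hn : (c.length : Int) = n) :
    ∀ M : Nat, (M : Int) < n →
    ((PySem.List.pyRange 1 (1 + (M : Int)) 1).foldl
      (fun c i => PySem.List.pySetD c i (PySem.List.pyGetD c i 0 + PySem.List.pyGetD c (i - 1) 0)) c).length = c.length ∧
    ∀ v : Nat, v < c.length →
      ((PySem.List.pyRange 1 (1 + (M : Int)) 1).foldl
        (fun c i => PySem.List.pySetD c i (PySem.List.pyGetD c i 0 + PySem.List.pyGetD c (i - 1) 0)) c).getD v 0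
        = if v ≤ M then ((List.range (v + 1)).map (fun t => c.getD t 0)).sum else c.getD v 0 := by
  intro M
  induction M with
  | zero =>
    intro _
    rw [show (1 : Int) + ((0 : Nat) : Int) = 1 by norm_num, PySem.List.pyRange_one_eq_nil (le_refl 1)]
    simp only [List.foldl_nil]
    refine ⟨trivial, ?_⟩
    intro v _
    by_cases hv0 : v ≤ 0
    · have hv : v = 0 := by omega
      subst hv
      simp [List.range_one]
    · simp [hv0]
  | succ M ihM =>
    intro hM1
    have hM1' : ((M : Int) + 1) < n := by push_cast at hM1; omega
    have hM : (M : Int) < n := by omega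
    obtain ⟨ihlen, ihval⟩ := ihM hM
    have hsplit : PySem.List.pyRange 1 (1 + ((M + 1 : Nat) : Int)) 1
        = PySem.List.pyRange 1 (1 + (M : Int)) 1 ++ [1 + (M : Int)] := by
      have h : (1 : Int) + ((M + 1 : Nat) : Int) = (1 + (M : Int)) + 1 := by push_cast; ring
      rw [h, PySem.List.pyRange_one_succ_right (by omega)]
    rw [hsplit, List.foldl_append]
    simp only [List.foldl_cons, List.foldl_nil]
    -- the new write at index 1 + M
    set c1 := (PySem.List.pyRange 1 (1 + (M : Int)) 1).foldl
      (fun c i => PySem.List.pySetD c i (PySem.List.pyGetD c i 0 + PySem.List.pyGetD c (i - 1) 0)) c with hc1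
    have hlen1 : c1.length = c.length := ihlen
    have hMlen : M + 1 < c.length := by omega
    have htn : ((1 : Int) + (M : Int)).toNat = M + 1 := by omega
    have hga : PySem.List.pyGetD c1 (1 + (M : Int)) 0 = c.getD (M + 1) 0 := by
      rw [pyGetD_toNat c1 _ (by omega) (by omega), htn, ihval (M + 1) hMlen, if_neg (by omega)]
    have hgb : PySem.List.pyGetD c1 (1 + (M : Int) - 1) 0
        = ((List.range (M + 1)).map (fun t => c.getD t 0)).sum := by
      have h1 : (1 : Int) + (M : Int) - 1 = (M : Int) := by ring
      rw [h1, pyGetD_toNat c1 _ (by omega) (by omega), Int.toNat_natCast,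
        ihval M (by omega), if_pos (le_refl M)]
    rw [hga, hgb, PySem.List.pySetD_of_nonneg c1 _ (by omega), htn]
    constructor
    · simp [hlen1]
    · intro v hv
      rw [getD_set c1 (M + 1) v _ (by omega) (by omega)]
      by_cases hvM : M + 1 = v
      · subst hvM
        rw [if_pos rfl, if_pos (le_refl _)]
        conv_rhs => rw [List.range_succ]
        simp only [List.map_append, List.sum_append, List.map_cons, List.map_nil,
          List.sum_cons, List.sum_nil, add_zero]
        ring
      · rw [if_neg hvM, ihval v (by omega)]
        by_cases hvM' : v ≤ M
        · rw [if_pos hvM', if_pos (by omega)]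
        · rw [if_neg hvM', if_neg (by omega)]

lemma sum_count (ar : List Int) (har : ∀ x ∈ ar, 0 ≤ x) :
    ∀ v : Nat, ((List.range (v + 1)).map (fun t => (ar.count ((t : Nat) : Int) : Int))).sum
      = (cLE ar ((v : Nat) : Int) : Int) := by
  intro v
  induction v with
  | zero =>
    have h1 := count_split ar 0
    have h2 := cLT_zero ar har
    simp [List.range_one]
    omega
  | succ v ihv =>
    have h1 := count_split ar ((v : Int) + 1)
    have h2 := cLT_succ ar (v : Int)
    rw [List.range_succ]
    simp only [List.map_append, List.sum_append, List.map_cons, List.map_nil, List.sum_cons,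
      List.sum_nil]
    push_cast at ihv ⊢
    omega

-- ===== counting_sort, phase 3: placement =====
def csStep (x : Int) (st : List Int × List Int) : List Int × List Int :=
  (PySem.List.pySetD st.1 x (PySem.List.pyGetD st.1 x 0 - 1),
   PySem.List.pySetD st.2
     (PySem.List.pyGetD (PySem.List.pySetD st.1 x (PySem.List.pyGetD st.1 x 0 - 1)) x 0) x)

def csPass : List Int → List Int × List Int → List Int × List Int
  | [], st => st
  | x :: xs, st => csStep x (csPass xs st)

lemma csPass_append (l : List Int) (y : Int) (st : List Int × List Int) :
    csPass (l ++ [y]) st = csPass l (csStep y st) := by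
  induction l generalizing st with
  | nil => rfl
  | cons a l ih => simp [csPass, ih]

lemma fold_to_pass (ar : List Int) : ∀ (k : Nat), k ≤ ar.length → ∀ st : List Int × List Int,
    (PySem.List.pyRange ((k : Int) - 1) (-1) (-1)).foldl
      (fun (st : List Int × List Int) i =>
        let c := PySem.List.pySetD st.1 (PySem.List.pyGetD ar i 0)
                   (PySem.List.pyGetD st.1 (PySem.List.pyGetD ar i 0) 0 - 1)
        let idx := PySem.List.pyGetD c (PySem.List.pyGetD ar i 0) 0
        (c, PySem.List.pySetD st.2 idx (PySem.List.pyGetD ar i 0))) st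
      = csPass (ar.take k) st := by
  intro k
  induction k with
  | zero =>
    intro _ st
    rw [show ((0 : Nat) : Int) - 1 = -1 by norm_num, PySem.List.pyRange_neg_one_eq_nil (le_refl _)]
    rfl
  | succ k ihk =>
    intro hk st
    have hklen : k < ar.length := by omega
    have h1 : ((k + 1 : Nat) : Int) - 1 = (k : Int) := by push_cast; ring
    rw [h1, PySem.List.pyRange_neg_one_cons (by omega), List.foldl_cons, ihk (by omega)]
    have htake : ar.take (k + 1) = ar.take k ++ [ar[k]] := by
      rw [List.take_add_one, List.getElem?_eq_getElem hklen]
      rfl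
    rw [htake, csPass_append]
    congr 1
    show csStep (PySem.List.pyGetD ar ((k : Nat) : Int) 0) st = csStep ar[k] st
    have hg : PySem.List.pyGetD ar ((k : Nat) : Int) 0 = ar[k] := by
      rw [pyGetD_toNat ar _ (by omega) (by omega), Int.toNat_natCast]
      exact List.getD_eq_getElem ar 0 hklen
    rw [hg]

lemma csPass_inv (full : List Int) (n : Int) (hel : ∀ x ∈ full, 0 ≤ x ∧ x < n) :
    ∀ (U pend c o : List Int), pend ++ U = full →
    c.length = n.toNat →
    (∀ v : Int, 0 ≤ v → v < n → c.getD v.toNat 0 = ((cLT full v + (pend ++ U).count v : Nat) : Int)) →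
    o.length = full.length →
    (∀ p : Nat, p < full.length →
      cLT full ((Sasc full).getD p 0) + (pend ++ U).count ((Sasc full).getD p 0) ≤ p →
      o.getD p 0 = (Sasc full).getD p 0) →
    (csPass U (c, o)).1.length = n.toNat ∧
    (∀ v : Int, 0 ≤ v → v < n → (csPass U (c, o)).1.getD v.toNat 0 = ((cLT full v + pend.count v : Nat) : Int)) ∧
    (csPass U (c, o)).2.length = full.length ∧
    (∀ p : Nat, p < full.length →
      cLT full ((Sasc full).getD p 0) + pend.count ((Sasc full).getD p 0) ≤ p →
      (csPass U (c, o)).2.getD p 0 = (Sasc full).getD p 0) := by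
  intro U
  induction U with
  | nil =>
    intro pend c o hfull hclen hcval holen hoval
    simp only [csPass]
    exact ⟨hclen, by simpa using hcval, holen, by simpa using hoval⟩
  | cons x xs ih =>
    intro pend c o hfull hclen hcval holen hoval
    have hx : x ∈ full := by rw [← hfull]; simp
    obtain ⟨hx0, hxn⟩ := hel x hx
    have hassoc : (pend ++ [x]) ++ xs = full := by simpa [List.append_assoc] using hfull
    have hcval' : ∀ v : Int, 0 ≤ v → v < n →
        c.getD v.toNat 0 = ((cLT full v + ((pend ++ [x]) ++ xs).count v : Nat) : Int) := by
      intro v h1 h2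
      simpa [List.append_assoc] using hcval v h1 h2
    have hoval' : ∀ p : Nat, p < full.length →
        cLT full ((Sasc full).getD p 0) + ((pend ++ [x]) ++ xs).count ((Sasc full).getD p 0) ≤ p →
        o.getD p 0 = (Sasc full).getD p 0 := by
      intro p h1 h2
      apply hoval p h1
      simpa [List.append_assoc] using h2
    obtain ⟨h1len, h1val, h2len, h2val⟩ := ih (pend ++ [x]) c o hassoc hclen hcval' holen hoval'
    simp only [csPass, csStep]
    set c1 := (csPass xs (c, o)).1 with hc1
    set o1 := (csPass xs (c, o)).2 with ho1
    have hxlen : x.toNat < c1.length := by omega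
    have hcnt : (pend ++ [x]).count x = pend.count x + 1 := by simp
    set m : Nat := cLT full x + pend.count x with hm
    have hcx : c1.getD x.toNat 0 = ((m + 1 : Nat) : Int) := by
      rw [h1val x hx0 hxn]
      norm_cast
      omega
    have hget1 : PySem.List.pyGetD c1 x 0 = ((m + 1 : Nat) : Int) := by
      rw [pyGetD_toNat c1 x hx0 (by omega), hcx]
    have hc2 : PySem.List.pySetD c1 x (PySem.List.pyGetD c1 x 0 - 1)
        = c1.set x.toNat ((m : Nat) : Int) := by
      rw [hget1, PySem.List.pySetD_of_nonneg c1 _ hx0]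
      congr 1
      push_cast
      ring
    have hget2 : PySem.List.pyGetD (c1.set x.toNat ((m : Nat) : Int)) x 0 = ((m : Nat) : Int) := by
      rw [pyGetD_toNat _ x hx0 (by simp; omega), getD_set c1 x.toNat x.toNat _ hxlen hxlen,
        if_pos rfl]
    -- m is in range
    have hcount_le : pend.count x + 1 ≤ full.count x := by
      have hsub : (pend ++ [x]).Sublist full := by
        rw [← hassoc]
        exact List.sublist_append_left _ _
      have := hsub.count_le (a := x)
      simp at this
      omega
    have hsplitx := count_split full x
    have hlex : cLE full x ≤ full.length := List.countP_le_length
    have hmlt : m < full.length := by omega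
    have hSlen : (Sasc full).length = full.length := Sasc_length full
    have hSm : (Sasc full).getD m 0 = x := by
      rw [List.getD_eq_getElem _ 0 (by omega)]
      apply SL2 _ (Sasc_pairwise full) x m (by omega)
      · rw [cLT_Sasc]; omega
      · rw [cLT_Sasc, count_Sasc]; omega
    have hmd : ((m : Nat) : Int).toNat = m := by simp
    refine ⟨?_, ?_, ?_, ?_⟩
    · rw [hc2]; simp [h1len]
    · intro v hv0 hvn
      rw [hc2]
      have hvlen : v.toNat < c1.length := by omega
      rw [getD_set c1 x.toNat v.toNat _ hxlen hvlen]
      by_cases hvx : x.toNat = v.toNat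
      · have hxv : x = v := by omega
        subst hxv
        rw [if_pos rfl]
      · have hxv : x ≠ v := by omega
        rw [if_neg hvx, h1val v hv0 hvn]
        congr 2
        rw [List.count_append]
        have : [x].count v = 0 := by
          rw [List.count_eq_zero]
          simp [Ne.symm hxv]
        omega
    · rw [hc2, hget2, PySem.List.pySetD_of_nonneg o1 _ (by positivity), hmd]
      simp [h2len]
    · intro p hp hcond
      rw [hc2, hget2, PySem.List.pySetD_of_nonneg o1 _ (by positivity), hmd]
      by_cases hpm : p = m
      · rw [getD_set o1 m p x (by omega) (by omega), if_pos hpm.symm, hpm]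
        exact hSm.symm
      · rw [getD_set o1 m p x (by omega) (by omega), if_neg (fun hh => hpm hh.symm)]
        apply h2val p hp
        by_cases hSpx : (Sasc full).getD p 0 = x
        · rw [hSpx] at hcond ⊢
          rw [hcnt]
          omega
        · have hc0 : ((pend ++ [x])).count ((Sasc full).getD p 0)
              = pend.count ((Sasc full).getD p 0) := by
            rw [List.count_append]
            have : [x].count ((Sasc full).getD p 0) = 0 := by
              rw [List.count_eq_zero]
              simp only [List.mem_singleton]
              exact hSpx
            omega
          rw [hc0]
          exact hcond

lemma counting_sort_correct (ar : List Int) (n : Int) (hn : 0 ≤ n)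
    (h : ∀ x ∈ ar, 0 ≤ x ∧ x < n) : counting_sort ar n = Sasc ar := by
  rcases eq_or_lt_of_le hn with hn0 | hnpos
  · subst hn0
    have har : ar = [] := by
      cases ar with
      | nil => rfl
      | cons a as =>
        obtain ⟨u1, u2⟩ := h a (by simp)
        omega
    subst har
    rfl
  · simp only [counting_sort, PySem.List.pyRepeat_singleton, PySem.List.len_eq]
    have hc0len : (List.replicate n.toNat (0 : Int)).length = n.toNat := by simp
    have hb1 : ∀ x ∈ ar, 0 ≤ x ∧ x < ((List.replicate n.toNat (0 : Int)).length : Int) := by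
      intro x hx
      obtain ⟨u1, u2⟩ := h x hx
      exact ⟨u1, by rw [hc0len]; omega⟩
    obtain ⟨h1len, h1val⟩ := cnt1_spec ar _ hb1
    set c1 : List Int := ar.foldl (fun c ele => PySem.List.pySetD c ele (PySem.List.pyGetD c ele 0 + 1))
      (List.replicate n.toNat 0) with hc1def
    have hc1len : c1.length = n.toNat := h1len.trans hc0len
    have hc1val : ∀ v : Nat, v < n.toNat → c1.getD v 0 = (ar.count ((v : Nat) : Int) : Int) := by
      intro v hv
      rw [h1val v (by simpa using hv), List.getD_eq_getElem _ 0 (by simpa using hv),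
        List.getElem_replicate, zero_add]
    set M : Nat := n.toNat - 1 with hM
    have hMn : 1 + (M : Int) = n := by omega
    have hMlt : (M : Int) < n := by omega
    obtain ⟨h2len, h2val⟩ := cnt2_spec c1 n (by rw [hc1len]; omega) M hMlt
    rw [← hMn]
    set c2 : List Int := (PySem.List.pyRange 1 (1 + (M : Int)) 1).foldl
      (fun c i => PySem.List.pySetD c i (PySem.List.pyGetD c i 0 + PySem.List.pyGetD c (i - 1) 0))
      c1 with hc2def
    have harl : ((ar.length : Int)).toNat = ar.length := by simp
    rw [harl, fold_to_pass ar ar.length (le_refl _), List.take_length]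
    -- invariants at the start of the placement pass
    have hcval : ∀ v : Int, 0 ≤ v → v < n →
        c2.getD v.toNat 0 = ((cLT ar v + (([] : List Int) ++ ar).count v : Nat) : Int) := by
      intro v hv0 hvn
      have hvt : v.toNat < c1.length := by omega
      rw [hc2def, h2val v.toNat hvt, if_pos (by omega : v.toNat ≤ M)]
      have hmap : ((List.range (v.toNat + 1)).map (fun t => c1.getD t 0))
          = ((List.range (v.toNat + 1)).map (fun t => (ar.count ((t : Nat) : Int) : Int))) := by
        apply List.map_congr_left
        intro t ht
        simp only [List.mem_range] at ht
        exact hc1val t (by omega)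
      rw [hmap, sum_count ar (fun x hx => (h x hx).1) v.toNat]
      have hvv : ((v.toNat : Nat) : Int) = v := by omega
      rw [hvv, count_split, List.nil_append]
    have hout0val : ∀ p : Nat, p < ar.length →
        cLT ar ((Sasc ar).getD p 0) + (([] : List Int) ++ ar).count ((Sasc ar).getD p 0) ≤ p →
        (List.replicate ar.length (0 : Int)).getD p 0 = (Sasc ar).getD p 0 := by
      intro p hp hcond
      exfalso
      have hplt : p < (Sasc ar).length := by rw [Sasc_length]; omega
      have hb := SL1b (Sasc ar) (Sasc_pairwise ar) p hplt
      have hgd : (Sasc ar).getD p 0 = (Sasc ar)[p]'hplt := List.getD_eq_getElem _ _ hplt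
      rw [hgd, List.nil_append] at hcond
      have h4 := count_split (Sasc ar) ((Sasc ar)[p]'hplt)
      have h5 := cLT_Sasc ar ((Sasc ar)[p]'hplt)
      have h6 := count_Sasc ar ((Sasc ar)[p]'hplt)
      omega
    obtain ⟨_, _, hflen, hfval⟩ := csPass_inv ar n h ar [] c2 (List.replicate ar.length 0)
      (by simp) (by rw [hc2def, h2len, hc1len]) hcval (by simp) hout0val
    apply List.ext_getElem
    · rw [hflen, Sasc_length]
    · intro i h1i h2i
      have hsi : i < (Sasc ar).length := by rw [Sasc_length]; omega
      have hcnd : cLT ar ((Sasc ar).getD i 0) + ([] : List Int).count ((Sasc ar).getD i 0) ≤ i := by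
        have hgd : (Sasc ar).getD i 0 = (Sasc ar)[i]'hsi := List.getD_eq_getElem _ _ hsi
        have ha := SL1a (Sasc ar) (Sasc_pairwise ar) i hsi
        have h5 := cLT_Sasc ar ((Sasc ar)[i]'hsi)
        rw [hgd]
        simp only [List.count_nil]
        omega
      have := hfval i (by rw [hflen] at h1i; omega) hcnd
      rw [List.getD_eq_getElem _ 0 h1i, List.getD_eq_getElem _ 0 hsi] at this
      exact this

-- ===== phase-1 partition loop of ice_cream =====
lemma phase1 (n : Int) : ∀ (l : List Int) (a t : Int) (r : List Int),
    l.foldl (fun (st : Int × Int × List Int) amount =>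
        if amount ≥ n then (st.1 + amount, st.2.1 + 1, st.2.2)
        else (st.1, st.2.1, st.2.2 ++ [amount])) (a, t, r)
      = (a + (l.filter (fun x => decide (n ≤ x))).sum,
         t + ((l.filter (fun x => decide (n ≤ x))).length : Int),
         r ++ l.filter (fun x => decide (x < n))) := by
  intro l
  induction l with
  | nil => intro a t r; simp
  | cons x xs ih =>
    intro a t r
    by_cases h : n ≤ x
    · rw [List.foldl_cons]
      simp only [ge_iff_le, if_pos h]
      rw [ih]
      rw [List.filter_cons_of_pos (by simpa using h),
        List.filter_cons_of_neg (by simp [not_lt.mpr h])]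
      simp only [List.sum_cons, List.length_cons, Prod.mk.injEq]
      exact ⟨by ring, by push_cast; ring, trivial⟩
    · rw [List.foldl_cons]
      simp only [ge_iff_le, if_neg h]
      rw [ih]
      rw [List.filter_cons_of_neg (by simpa using h),
        List.filter_cons_of_pos (by simp [not_le.mp h])]
      simp

-- ===== phase-2 eating loop =====
def gAcc : List Int → Int × Int → Int × Int
  | [], st => st
  | v :: vs, st => if v ≤ st.2 then st else gAcc vs (st.1 + v, st.2 + 1)

lemma iceLoop_eq (rem : List Int) : ∀ (k : Nat), k ≤ rem.length → ∀ st : Int × Int,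
    iceLoop rem (PySem.List.pyRange ((k : Int) - 1) (-1) (-1)) st
      = gAcc ((rem.take k).reverse) st := by
  intro k
  induction k with
  | zero =>
    intro _ st
    rw [show ((0 : Nat) : Int) - 1 = -1 by norm_num, PySem.List.pyRange_neg_one_eq_nil (le_refl _)]
    rfl
  | succ k ihk =>
    intro hk st
    have hklen : k < rem.length := by omega
    have h1 : ((k + 1 : Nat) : Int) - 1 = (k : Int) := by push_cast; ring
    rw [h1, PySem.List.pyRange_neg_one_cons (by omega)]
    have htake : (rem.take (k + 1)).reverse = rem[k] :: (rem.take k).reverse := by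
      rw [List.take_add_one, List.getElem?_eq_getElem hklen]
      simp
    rw [htake]
    have hg : PySem.List.pyGetD rem ((k : Nat) : Int) 0 = rem[k] := by
      rw [pyGetD_toNat rem _ (by omega) (by omega), Int.toNat_natCast]
      exact List.getD_eq_getElem rem 0 hklen
    show (if PySem.List.pyGetD rem ((k : Nat) : Int) 0 ≤ st.2 then st
      else iceLoop rem (PySem.List.pyRange ((k : Int) - 1) (-1) (-1))
        (st.1 + PySem.List.pyGetD rem ((k : Nat) : Int) 0, st.2 + 1)) = _
    rw [hg]
    show _ = if rem[k] ≤ st.2 then st else gAcc ((rem.take k).reverse) (st.1 + rem[k], st.2 + 1)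
    by_cases hb : rem[k] ≤ st.2
    · rw [if_pos hb, if_pos hb]
    · rw [if_neg hb, if_neg hb, ihk (by omega)]

def greedy : List Int → Int → Int
  | [], _ => 0
  | v :: vs, i => if v ≤ i then 0 else (v - i) + greedy vs (i + 1)

lemma altLoop_eq (l : List Int) : ∀ (i tot : Int), altLoop l i tot = tot + greedy l i := by
  induction l with
  | nil => intro i tot; simp [altLoop, greedy]
  | cons v vs ih =>
    intro i tot
    by_cases h : v ≤ i
    · simp [altLoop, greedy, h]
    · simp only [altLoop, greedy, if_neg h]
      rw [ih]
      ring

def tri (t : Int) : Int := PySem.Int.floordiv (t * (t - 1)) 2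

lemma tri_succ (t : Int) : tri (t + 1) = tri t + t := by
  unfold tri
  rw [PySem.Int.floordiv_eq_ediv_of_pos (by norm_num), PySem.Int.floordiv_eq_ediv_of_pos (by norm_num)]
  have h : (t + 1) * (t + 1 - 1) = t * (t - 1) + t * 2 := by ring
  rw [h, Int.add_mul_ediv_right _ _ (by norm_num)]

lemma tri_zero : tri 0 = 0 := by decide

lemma gAcc_spec (l : List Int) : ∀ a t : Int,
    (gAcc l (a, t)).1 - tri (gAcc l (a, t)).2 = a - tri t + greedy l t := by
  induction l with
  | nil => intro a t; simp [gAcc, greedy]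
  | cons v vs ih =>
    intro a t
    by_cases h : v ≤ t
    · simp [gAcc, greedy, h]
    · simp only [gAcc, greedy, if_neg h]
      rw [ih, tri_succ]
      ring

lemma greedy_append (ys zs : List Int) : ∀ i : Int, 0 ≤ i →
    (∀ x ∈ ys, i + (ys.length : Int) ≤ x) →
    greedy (ys ++ zs) i
      = ys.sum - (tri (i + (ys.length : Int)) - tri i) + greedy zs (i + (ys.length : Int)) := by
  induction ys with
  | nil => intro i _ _; simp
  | cons y ys ih =>
    intro i hi hbig
    have hlen : (((y :: ys).length : Nat) : Int) = (ys.length : Int) + 1 := by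
      push_cast [List.length_cons]; ring
    have hy : i + ((ys.length : Int) + 1) ≤ y := by
      have := hbig y (by simp)
      omega
    have hylen : (0 : Int) ≤ (ys.length : Int) := by positivity
    have hny : ¬ y ≤ i := by omega
    show (if y ≤ i then 0 else (y - i) + greedy (ys ++ zs) (i + 1)) = _
    rw [if_neg hny]
    rw [ih (i + 1) (by omega) (by
      intro x hx
      have := hbig x (by simp [hx])
      omega)]
    rw [hlen, show i + ((ys.length : Int) + 1) = (i + 1) + (ys.length : Int) by ring, tri_succ]
    simp only [List.sum_cons]
    ring

-- ===== descending sort bridge =====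
lemma desc_unique (l ys : List Int) (hperm : ys.Perm l) (hpw : ys.Pairwise (fun a b => b ≤ a)) :
    PySem.List.sorted l (fun x => x) true = ys := by
  apply List.Perm.eq_of_pairwise (le := fun a b : Int => b ≤ a)
  · intro a b _ _ h1 h2
    exact le_antisymm h2 h1
  · simpa using PySem.List.sorted_pairwise_rev l (fun x : Int => x)
  · exact hpw
  · exact (PySem.List.sorted_perm l _ _).trans hperm.symm

lemma desc_eq_reverse_asc (l : List Int) :
    PySem.List.sorted l (fun x => x) true = (Sasc l).reverse := by
  apply desc_unique
  · exact ((Sasc l).reverse_perm).trans (Sasc_perm l)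
  · rw [List.pairwise_reverse]
    exact Sasc_pairwise l

lemma desc_split (T : List Int) (n : Int) :
    PySem.List.sorted T (fun x => x) true
      = PySem.List.sorted (T.filter (fun x => decide (n ≤ x))) (fun x => x) true
        ++ PySem.List.sorted (T.filter (fun x => decide (x < n))) (fun x => x) true := by
  apply desc_unique
  · have h1 : (fun x : Int => decide (x < n)) = (fun x : Int => !(decide (n ≤ x))) := by
      funext x
      by_cases h : n ≤ x
      · simp [h, not_lt.mpr h]
      · simp [h, not_le.mp h]
    refine (List.Perm.append (PySem.List.sorted_perm _ _ _) (PySem.List.sorted_perm _ _ _)).trans ?_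
    rw [h1]
    exact List.filter_append_perm _ T
  · rw [List.pairwise_append]
    refine ⟨by simpa using PySem.List.sorted_pairwise_rev _ (fun x : Int => x),
      by simpa using PySem.List.sorted_pairwise_rev _ (fun x : Int => x), ?_⟩
    intro a ha b hb
    rw [PySem.List.mem_sorted] at ha hb
    have h1 : n ≤ a := by have := List.of_mem_filter ha; simpa using this
    have h2 : b < n := by have := List.of_mem_filter hb; simpa using this
    omega

-- ===== final assembly =====
theorem ice_cream_spec : Claim_equal_ice_cream := by
  intro T _ hPre
  unfold Spec_ice_cream
  simp only [ice_cream, ice_cream_alt]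
  rw [phase1 (PySem.List.len T) T 0 0 []]
  set n : Int := PySem.List.len T with hn
  have hnlen : n = (T.length : Int) := PySem.List.len_eq T
  set bigs := T.filter (fun x => decide (n ≤ x)) with hbigs
  set smalls := T.filter (fun x => decide (x < n)) with hsmalls
  dsimp only
  have hsm : ∀ x ∈ smalls, 0 ≤ x ∧ x < n := by
    intro x hx
    refine ⟨hPre x (List.mem_of_mem_filter hx), ?_⟩
    have := List.of_mem_filter hx
    simpa using this
  rw [List.nil_append, counting_sort_correct smalls n (by rw [hnlen]; positivity) hsm]
  rw [PySem.List.len_eq (Sasc smalls)]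
  rw [iceLoop_eq (Sasc smalls) (Sasc smalls).length (le_refl _), List.take_length]
  have htri : ∀ t : Int, PySem.Int.floordiv (t * (t - 1)) 2 = tri t := fun _ => rfl
  rw [htri, gAcc_spec]
  -- B side
  rw [altLoop_eq, desc_split T n]
  have hbig : ∀ x ∈ PySem.List.sorted bigs (fun x => x) true,
      (0 : Int) + ((PySem.List.sorted bigs (fun x => x) true).length : Int) ≤ x := by
    intro x hx
    rw [PySem.List.mem_sorted] at hx
    have h1 : n ≤ x := by
      have := List.of_mem_filter hx
      simpa using this
    have h2 : (bigs.length : Int) ≤ n := by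
      have := List.length_filter_le (fun x => decide (n ≤ x)) T
      rw [hnlen]
      exact_mod_cast this
    rw [PySem.List.length_sorted]
    omega
  rw [greedy_append _ _ 0 (le_refl 0) hbig]
  rw [(PySem.List.sorted_perm bigs (fun x => x) true).sum_eq, PySem.List.length_sorted,
    desc_eq_reverse_asc smalls, tri_zero]
  simp only [zero_add]
  ring
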